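-- pv_equiv track=rewrite | github.com/Shan-M98/JSExtractor | js_recon.py | categorize_urls
-- ===== SOURCE A (Python) =====
-- def categorize_urls(urls):
--     """Categorize URLs by type"""
--     categories = {
--         'api_endpoints': [],
--         'analytics': [],
--         'cdn_urls': [],
--         'external_resources': [],
--     }
--
--     for url in urls:
--         url_lower = url.lower()
--         if any(x in url_lower for x in ['/api/', '/v1/', '/v2/', '/graphql', '/rest/']):
--             categories['api_endpoints'].append(url)
--         elif any(x in url_lower for x in ['analytics', 'tracking', 'metrics', 'telemetry']):
--             categories['analytics'].append(url)
--         elif any(x in url_lower for x in ['cdn', 'static', 'assets']):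
--             categories['cdn_urls'].append(url)
--         else:
--             categories['external_resources'].append(url)
--
--     return categories
-- ===== SOURCE B (Python) =====
-- def categorize_urls(urls):
--     """Categorize URLs by type"""
--     rules = [
--         ('api_endpoints', ('/api/', '/v1/', '/v2/', '/graphql', '/rest/')),
--         ('analytics', ('analytics', 'tracking', 'metrics', 'telemetry')),
--         ('cdn_urls', ('cdn', 'static', 'assets')),
--     ]
--
--     def label(url):
--         url_lower = url.lower()
--         return next((cat for cat, subs in rules
--                      if any(s in url_lower for s in subs)), 'external_resources')
--
--     return {cat: [u for u in urls if label(u) == cat]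
--             for cat in ('api_endpoints', 'analytics', 'cdn_urls', 'external_resources')}
-- ===== Notes on version B (the rewrite author's own statement) =====
-- stated objective: idiomatic
-- what changed: A folds every url into a mutable dict via an if/elif append chain; B defines an ordered rule table with a first-match label function and builds each bucket declaratively with a dict comprehension that filters the url list per category.
import Mathlib
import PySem

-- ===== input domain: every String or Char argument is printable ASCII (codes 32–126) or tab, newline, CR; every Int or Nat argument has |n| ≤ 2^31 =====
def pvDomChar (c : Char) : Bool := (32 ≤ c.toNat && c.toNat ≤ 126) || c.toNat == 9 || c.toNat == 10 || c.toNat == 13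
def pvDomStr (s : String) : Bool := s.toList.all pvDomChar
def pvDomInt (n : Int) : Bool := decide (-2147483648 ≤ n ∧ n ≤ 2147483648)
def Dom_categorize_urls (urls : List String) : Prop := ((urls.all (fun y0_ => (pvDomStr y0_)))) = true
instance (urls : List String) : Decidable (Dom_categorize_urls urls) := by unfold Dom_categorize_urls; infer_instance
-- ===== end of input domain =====

-- B replaces A's if/elif dict-append fold by an ordered rule table with a first-match
-- label function and a per-category filter comprehension (idiomatic; same cost).


-- ===== PORT A =====
-- loop body of A's 'for url in urls' (the if/elif append chain on the dict)
def pvAStep (categories : PySem.Dict String (List String)) (url : String) :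
    PySem.Dict String (List String) :=
  let url_lower := PySem.Str.lower url
  if ["/api/", "/v1/", "/v2/", "/graphql", "/rest/"].any
      (fun x => PySem.Str.isIn x url_lower) then
    categories.modify "api_endpoints" [] (· ++ [url])
  else if ["analytics", "tracking", "metrics", "telemetry"].any
      (fun x => PySem.Str.isIn x url_lower) then
    categories.modify "analytics" [] (· ++ [url])
  else if ["cdn", "static", "assets"].any
      (fun x => PySem.Str.isIn x url_lower) then
    categories.modify "cdn_urls" [] (· ++ [url])
  else
    categories.modify "external_resources" [] (· ++ [url])

def categorize_urls (urls : List String) : List (String × List String) :=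
  (urls.foldl pvAStep
    (PySem.Dict.ofList
      [("api_endpoints", []), ("analytics", []), ("cdn_urls", []),
       ("external_resources", [])])).items

-- ===== PORT B =====
def pvRules : List (String × List String) :=
  [("api_endpoints", ["/api/", "/v1/", "/v2/", "/graphql", "/rest/"]),
   ("analytics", ["analytics", "tracking", "metrics", "telemetry"]),
   ("cdn_urls", ["cdn", "static", "assets"])]

-- B's helper 'label': first rule whose substrings hit url.lower(), else the default
def pvLabel (url : String) : String :=
  let url_lower := PySem.Str.lower url
  ((pvRules.find? (fun r => r.2.any (fun s => PySem.Str.isIn s url_lower))).map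
    Prod.fst).getD "external_resources"

def categorize_urls_alt (urls : List String) : List (String × List String) :=
  ["api_endpoints", "analytics", "cdn_urls", "external_resources"].map
    (fun cat => (cat, urls.filter (fun u => pvLabel u == cat)))

-- ===== PRECONDITION & SPEC =====
def Spec_categorize_urls (urls : List String) (out : List (String × List String)) : Prop := out = categorize_urls_alt urls
instance (urls : List String) (out : List (String × List String)) : Decidable (Spec_categorize_urls urls out) := by unfold Spec_categorize_urls; infer_instance

-- ===== CLAIM (what is proved, stated in full; the proofs are below) =====
def Claim_equal_categorize_urls : Prop := ∀ (urls : List String), Dom_categorize_urls urls → Spec_categorize_urls urls (categorize_urls urls)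

-- ===== LEMMAS AND PROOFS =====

-- A's loop body is exactly "append url to the bucket named by pvLabel url"
theorem pvAStep_eq (d : PySem.Dict String (List String)) (url : String) :
    pvAStep d url = d.modify (pvLabel url) [] (· ++ [url]) := by
  simp only [pvAStep, pvLabel, pvRules]
  by_cases h1 : PySem.Chars.isIn ['/', 'a', 'p', 'i', '/'] (PySem.Chars.lower url.toList) = true
  · simp [*]
  rw [Bool.not_eq_true] at h1
  by_cases h2 : PySem.Chars.isIn ['/', 'v', '1', '/'] (PySem.Chars.lower url.toList) = true
  · simp [*]
  rw [Bool.not_eq_true] at h2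
  by_cases h3 : PySem.Chars.isIn ['/', 'v', '2', '/'] (PySem.Chars.lower url.toList) = true
  · simp [*]
  rw [Bool.not_eq_true] at h3
  by_cases h4 : PySem.Chars.isIn ['/', 'g', 'r', 'a', 'p', 'h', 'q', 'l'] (PySem.Chars.lower url.toList) = true
  · simp [*]
  rw [Bool.not_eq_true] at h4
  by_cases h5 : PySem.Chars.isIn ['/', 'r', 'e', 's', 't', '/'] (PySem.Chars.lower url.toList) = true
  · simp [*]
  rw [Bool.not_eq_true] at h5
  by_cases h6 : PySem.Chars.isIn ['a', 'n', 'a', 'l', 'y', 't', 'i', 'c', 's'] (PySem.Chars.lower url.toList) = true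
  · simp [*]
  rw [Bool.not_eq_true] at h6
  by_cases h7 : PySem.Chars.isIn ['t', 'r', 'a', 'c', 'k', 'i', 'n', 'g'] (PySem.Chars.lower url.toList) = true
  · simp [*]
  rw [Bool.not_eq_true] at h7
  by_cases h8 : PySem.Chars.isIn ['m', 'e', 't', 'r', 'i', 'c', 's'] (PySem.Chars.lower url.toList) = true
  · simp [*]
  rw [Bool.not_eq_true] at h8
  by_cases h9 : PySem.Chars.isIn ['t', 'e', 'l', 'e', 'm', 'e', 't', 'r', 'y'] (PySem.Chars.lower url.toList) = true
  · simp [*]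
  rw [Bool.not_eq_true] at h9
  by_cases h10 : PySem.Chars.isIn ['c', 'd', 'n'] (PySem.Chars.lower url.toList) = true
  · simp [*]
  rw [Bool.not_eq_true] at h10
  by_cases h11 : PySem.Chars.isIn ['s', 't', 'a', 't', 'i', 'c'] (PySem.Chars.lower url.toList) = true
  · simp [*]
  rw [Bool.not_eq_true] at h11
  by_cases h12 : PySem.Chars.isIn ['a', 's', 's', 'e', 't', 's'] (PySem.Chars.lower url.toList) = true
  · simp [*]
  rw [Bool.not_eq_true] at h12
  simp [h1, h2, h3, h4, h5, h6, h7, h8, h9, h10, h11, h12]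

-- pvLabel always names one of the four preset buckets
theorem pvLabel_mem (url : String) :
    pvLabel url ∈ ["api_endpoints", "analytics", "cdn_urls", "external_resources"] := by
  simp only [pvLabel, pvRules]
  by_cases h1 : PySem.Chars.isIn ['/', 'a', 'p', 'i', '/'] (PySem.Chars.lower url.toList) = true
  · simp [*]
  rw [Bool.not_eq_true] at h1
  by_cases h2 : PySem.Chars.isIn ['/', 'v', '1', '/'] (PySem.Chars.lower url.toList) = true
  · simp [*]
  rw [Bool.not_eq_true] at h2
  by_cases h3 : PySem.Chars.isIn ['/', 'v', '2', '/'] (PySem.Chars.lower url.toList) = true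
  · simp [*]
  rw [Bool.not_eq_true] at h3
  by_cases h4 : PySem.Chars.isIn ['/', 'g', 'r', 'a', 'p', 'h', 'q', 'l'] (PySem.Chars.lower url.toList) = true
  · simp [*]
  rw [Bool.not_eq_true] at h4
  by_cases h5 : PySem.Chars.isIn ['/', 'r', 'e', 's', 't', '/'] (PySem.Chars.lower url.toList) = true
  · simp [*]
  rw [Bool.not_eq_true] at h5
  by_cases h6 : PySem.Chars.isIn ['a', 'n', 'a', 'l', 'y', 't', 'i', 'c', 's'] (PySem.Chars.lower url.toList) = true
  · simp [*]
  rw [Bool.not_eq_true] at h6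
  by_cases h7 : PySem.Chars.isIn ['t', 'r', 'a', 'c', 'k', 'i', 'n', 'g'] (PySem.Chars.lower url.toList) = true
  · simp [*]
  rw [Bool.not_eq_true] at h7
  by_cases h8 : PySem.Chars.isIn ['m', 'e', 't', 'r', 'i', 'c', 's'] (PySem.Chars.lower url.toList) = true
  · simp [*]
  rw [Bool.not_eq_true] at h8
  by_cases h9 : PySem.Chars.isIn ['t', 'e', 'l', 'e', 'm', 'e', 't', 'r', 'y'] (PySem.Chars.lower url.toList) = true
  · simp [*]
  rw [Bool.not_eq_true] at h9
  by_cases h10 : PySem.Chars.isIn ['c', 'd', 'n'] (PySem.Chars.lower url.toList) = true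
  · simp [*]
  rw [Bool.not_eq_true] at h10
  by_cases h11 : PySem.Chars.isIn ['s', 't', 'a', 't', 'i', 'c'] (PySem.Chars.lower url.toList) = true
  · simp [*]
  rw [Bool.not_eq_true] at h11
  by_cases h12 : PySem.Chars.isIn ['a', 's', 's', 'e', 't', 's'] (PySem.Chars.lower url.toList) = true
  · simp [*]
  rw [Bool.not_eq_true] at h12
  simp [h1, h2, h3, h4, h5, h6, h7, h8, h9, h10, h11, h12]

-- running A's loop leaves each bucket holding exactly the urls pvLabel sends there
theorem foldl_getD (urls : List String) (d : PySem.Dict String (List String)) (c : String) :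
    (urls.foldl (fun d u => d.modify (pvLabel u) [] (· ++ [u])) d).getD c [] =
      d.getD c [] ++ urls.filter (fun u => pvLabel u == c) := by
  have hp : urls.foldl (fun d u => d.modify (pvLabel u) [] (· ++ [u])) d =
      (urls.map (fun u => (pvLabel u, u))).foldl
        (fun d p => d.modify p.1 [] (· ++ [p.2])) d := by
    rw [List.foldl_map]
  rw [hp, PySem.Dict.getD_foldl_modify_append]
  congr 1
  simp [List.filter_map, Function.comp_def]

-- ===== VERDICT (by name: the statement is the Claim_ definition above) =====
theorem categorize_urls_spec : Claim_equal_categorize_urls := by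
  intro urls _
  show categorize_urls urls = categorize_urls_alt urls
  unfold categorize_urls categorize_urls_alt
  have hf : pvAStep = fun d u => d.modify (pvLabel u) [] (· ++ [u]) :=
    funext fun d => funext fun url => pvAStep_eq d url
  rw [hf]
  set d0 : PySem.Dict String (List String) :=
    PySem.Dict.ofList
      [("api_endpoints", []), ("analytics", []), ("cdn_urls", []),
       ("external_resources", [])] with hd0
  have hkeys : (urls.foldl (fun d u => d.modify (pvLabel u) [] (· ++ [u])) d0).keys =
      ["api_endpoints", "analytics", "cdn_urls", "external_resources"] := by
    rw [PySem.Dict.keys_foldl_modify_key]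
    rw [PySem.Set.update_eq_append_filter]
    have hnil : (PySem.Set.ofList (urls.map pvLabel)).filter
        (fun y => !(PySem.Set.contains d0.keys y)) = [] := by
      rw [List.filter_eq_nil_iff]
      intro a ha
      rw [PySem.Set.mem_ofList] at ha
      obtain ⟨u, hu, rfl⟩ := List.mem_map.mp ha
      have hm := pvLabel_mem u
      have hk0 : d0.keys = ["api_endpoints", "analytics", "cdn_urls", "external_resources"] := by
        rw [hd0]; rfl
      have hmem : pvLabel u ∈ d0.keys := hk0 ▸ hm
      simp [hmem]
    rw [hnil, List.append_nil, hd0]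
    rfl
  have hnd : (urls.foldl (fun d u => d.modify (pvLabel u) [] (· ++ [u])) d0).keys.Nodup := by
    rw [hkeys]; decide
  rw [PySem.Dict.items_eq_map_keys _ hnd [], hkeys]
  simp only [List.map_cons, List.map_nil, foldl_getD]
  rfl
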